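-- pv_equiv track=rewrite | github.com/randomtuser/python_1_year_HW | specops.py | najveckrat_obiskana
-- ===== SOURCE A (Python) =====
-- import collections
--
-- def koraki(x, y, pot):
--     pot_korakov = [(x,y)]
--     for znak in pot:
--         if znak == "v":
--             y += 1
--             pot_korakov.append((x,y))
--         if znak == ">":
--             x += 1
--             pot_korakov.append((x, y))
--         if znak == "<":
--             x -= 1
--             pot_korakov.append((x, y))
--         if znak == "^":
--             y -= 1
--             pot_korakov.append((x, y))
--     return pot_korakov
--
-- def najveckrat_obiskana(opisi):
--     vsi_koraki = []
--     for opis in opisi: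
--         x,y, pot = opis
--         korak = koraki(x,y, pot)
--
--         vsi_koraki += tuple(korak)
--
--     pogostosti = collections.defaultdict(int)
--     for ime in vsi_koraki:
--         pogostosti[ime] += 1
--
--     pogostosti1 = dict(pogostosti)
--     st = 0
--     t = []
--     for item, value in pogostosti1.items():
--         if st < value:
--             st = value
--
--
--     najbolj = []
--     for item, value in pogostosti1.items():
--         if st == value:
--            najbolj.append(item)
--
--
--
--
--     return set(najbolj)
-- ===== SOURCE B (Python) =====
-- def najveckrat_obiskana(opisi):
--     # One fused pass: walk each path updating a counter dict in place while
--     # maintaining the running maximum count; no big concatenated visit list,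
--     # no separate max-scan afterwards.
--     stevci = {}
--     najvec = 0
--     for x, y, pot in opisi:
--         c = stevci.get((x, y), 0) + 1
--         stevci[(x, y)] = c
--         if c > najvec:
--             najvec = c
--         for znak in pot:
--             if znak == "v":
--                 y += 1
--             elif znak == ">":
--                 x += 1
--             elif znak == "<":
--                 x -= 1
--             elif znak == "^":
--                 y -= 1
--             else:
--                 continue
--             c = stevci.get((x, y), 0) + 1
--             stevci[(x, y)] = c
--             if c > najvec:
--                 najvec = c
--     return {tocka for tocka, c in stevci.items() if c == najvec}
-- ===== Notes on version B (the rewrite author's own statement) =====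
-- stated objective: alternative
-- what changed: A builds every walk's visit list, concatenates them into one big list, counts it into a defaultdict, then runs a separate max-scan and a separate collect-scan over the dict; B fuses all of this into one streaming pass that counts each visited coordinate directly into a dict while maintaining the running maximum count, finishing with a single filter of the dict items.
import Mathlib
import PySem

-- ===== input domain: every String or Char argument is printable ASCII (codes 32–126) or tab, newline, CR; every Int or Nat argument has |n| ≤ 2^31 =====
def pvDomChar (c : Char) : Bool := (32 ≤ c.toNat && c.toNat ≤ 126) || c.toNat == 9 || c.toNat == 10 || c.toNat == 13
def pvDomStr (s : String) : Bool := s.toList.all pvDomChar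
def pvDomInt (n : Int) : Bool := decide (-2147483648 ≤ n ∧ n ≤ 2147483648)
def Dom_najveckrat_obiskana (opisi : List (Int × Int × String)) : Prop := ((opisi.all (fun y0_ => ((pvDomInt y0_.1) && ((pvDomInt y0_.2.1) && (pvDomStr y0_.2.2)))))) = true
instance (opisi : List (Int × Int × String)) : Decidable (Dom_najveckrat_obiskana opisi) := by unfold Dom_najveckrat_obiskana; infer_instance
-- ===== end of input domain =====

-- B fuses A's five phases (build every walk's visit list, concatenate, count, max-scan, collect-scan)
-- into one streaming pass that counts while walking and maintains the running maximum; objective: alternative decomposition.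

-- ===== PORT A =====
-- helper koraki: the four sequential `if znak == …` blocks, each over the updated (x, y, acc) state
def korakiStep (s : Int × Int × List (Int × Int)) (znak : Char) : Int × Int × List (Int × Int) :=
  let s := if znak = 'v' then (s.1, s.2.1 + 1, s.2.2 ++ [(s.1, s.2.1 + 1)]) else s
  let s := if znak = '>' then (s.1 + 1, s.2.1, s.2.2 ++ [(s.1 + 1, s.2.1)]) else s
  let s := if znak = '<' then (s.1 - 1, s.2.1, s.2.2 ++ [(s.1 - 1, s.2.1)]) else s
  let s := if znak = '^' then (s.1, s.2.1 - 1, s.2.2 ++ [(s.1, s.2.1 - 1)]) else s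
  s

def koraki (x y : Int) (pot : String) : List (Int × Int) :=
  (pot.toList.foldl korakiStep (x, y, [(x, y)])).2.2

def najveckrat_obiskana (opisi : List (Int × Int × String)) : List (Int × Int) :=
  let vsi_koraki := opisi.foldl (fun acc o => acc ++ koraki o.1 o.2.1 o.2.2) []
  let pogostosti := vsi_koraki.foldl
    (fun (d : PySem.Dict (Int × Int) Int) ime => d.modify ime 0 (· + 1)) PySem.Dict.empty
  let st := pogostosti.items.foldl (fun st kv => if st < kv.2 then kv.2 else st) 0
  let najbolj := pogostosti.items.foldl (fun acc kv => if st = kv.2 then acc ++ [kv.1] else acc) []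
  PySem.Set.ofList najbolj

-- ===== PORT B =====
-- obisci: count one visited coordinate and update the running maximum
def obisci (s : PySem.Dict (Int × Int) Int × Int) (p : Int × Int) : PySem.Dict (Int × Int) Int × Int :=
  let c := s.1.getD p 0 + 1
  (s.1.insert p c, if c > s.2 then c else s.2)

-- one move character: update the position (or skip the char) and count the new coordinate
def potezaStep (s : (PySem.Dict (Int × Int) Int × Int) × Int × Int) (znak : Char) :
    (PySem.Dict (Int × Int) Int × Int) × Int × Int :=
  if znak = 'v' then (obisci s.1 (s.2.1, s.2.2 + 1), s.2.1, s.2.2 + 1)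
  else if znak = '>' then (obisci s.1 (s.2.1 + 1, s.2.2), s.2.1 + 1, s.2.2)
  else if znak = '<' then (obisci s.1 (s.2.1 - 1, s.2.2), s.2.1 - 1, s.2.2)
  else if znak = '^' then (obisci s.1 (s.2.1, s.2.2 - 1), s.2.1, s.2.2 - 1)
  else s

def najveckrat_obiskana_alt (opisi : List (Int × Int × String)) : List (Int × Int) :=
  let fin := opisi.foldl
    (fun (db : PySem.Dict (Int × Int) Int × Int) o =>
      (o.2.2.toList.foldl potezaStep (obisci db (o.1, o.2.1), o.1, o.2.1)).1)
    (PySem.Dict.empty, 0)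
  PySem.Set.ofList ((fin.1.items.filter (fun kv => kv.2 = fin.2)).map Prod.fst)

-- ===== PRECONDITION & SPEC =====
def Spec_najveckrat_obiskana (opisi : List (Int × Int × String)) (out : List (Int × Int)) : Prop := out = najveckrat_obiskana_alt opisi
instance (opisi : List (Int × Int × String)) (out : List (Int × Int)) : Decidable (Spec_najveckrat_obiskana opisi out) := by unfold Spec_najveckrat_obiskana; infer_instance

-- ===== CLAIM (what is proved, stated in full; the proofs are below) =====
def Claim_equal_najveckrat_obiskana : Prop := ∀ (opisi : List (Int × Int × String)), Dom_najveckrat_obiskana opisi → Spec_najveckrat_obiskana opisi (najveckrat_obiskana opisi)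

-- ===== LEMMAS AND PROOFS =====

-- the list of coordinates a walk visits after its start, and its final position
def pvVisits : Int → Int → List Char → List (Int × Int)
  | x, y, z :: cs =>
    if z = 'v' then (x, y + 1) :: pvVisits x (y + 1) cs
    else if z = '>' then (x + 1, y) :: pvVisits (x + 1) y cs
    else if z = '<' then (x - 1, y) :: pvVisits (x - 1) y cs
    else if z = '^' then (x, y - 1) :: pvVisits x (y - 1) cs
    else pvVisits x y cs
  | _, _, [] => []

def pvFin : Int → Int → List Char → Int × Int
  | x, y, z :: cs =>
    if z = 'v' then pvFin x (y + 1) cs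
    else if z = '>' then pvFin (x + 1) y cs
    else if z = '<' then pvFin (x - 1) y cs
    else if z = '^' then pvFin x (y - 1) cs
    else pvFin x y cs
  | x, y, [] => (x, y)

-- the flat stream of all visited coordinates
def pvAll (opisi : List (Int × Int × String)) : List (Int × Int) :=
  opisi.flatMap (fun o => (o.1, o.2.1) :: pvVisits o.1 o.2.1 o.2.2.toList)

-- the maximum visit count (0 for the empty stream)
def pvMx (L : List (Int × Int)) : Int :=
  (L.map (fun p => (L.count p : Int))).foldl max 0

theorem korakiFold (cs : List Char) (x y : Int) (acc : List (Int × Int)) :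
    cs.foldl korakiStep (x, y, acc) =
      ((pvFin x y cs).1, (pvFin x y cs).2, acc ++ pvVisits x y cs) := by
  induction cs generalizing x y acc with
  | nil => simp [pvFin, pvVisits]
  | cons z cs ih =>
    by_cases h1 : z = 'v'
    · simp [h1, korakiStep, pvFin, pvVisits, ih, List.append_assoc]
    · by_cases h2 : z = '>'
      · simp [h2, korakiStep, pvFin, pvVisits, ih, List.append_assoc]
      · by_cases h3 : z = '<'
        · simp [h3, korakiStep, pvFin, pvVisits, ih, List.append_assoc]
        · by_cases h4 : z = '^'
          · simp [h4, korakiStep, pvFin, pvVisits, ih, List.append_assoc]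
          · simp [korakiStep, h1, h2, h3, h4, pvFin, pvVisits, ih]

theorem koraki_eq (x y : Int) (pot : String) :
    koraki x y pot = (x, y) :: pvVisits x y pot.toList := by
  simp [koraki, korakiFold]

theorem potezaFold (cs : List Char) (x y : Int) (db : PySem.Dict (Int × Int) Int × Int) :
    cs.foldl potezaStep (db, x, y) =
      ((pvVisits x y cs).foldl obisci db, (pvFin x y cs).1, (pvFin x y cs).2) := by
  induction cs generalizing x y db with
  | nil => simp [pvFin, pvVisits]
  | cons z cs ih =>
    by_cases h1 : z = 'v'
    · simp [h1, potezaStep, pvFin, pvVisits, ih]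
    · by_cases h2 : z = '>'
      · simp [h2, potezaStep, pvFin, pvVisits, ih]
      · by_cases h3 : z = '<'
        · simp [h3, potezaStep, pvFin, pvVisits, ih]
        · by_cases h4 : z = '^'
          · simp [h4, potezaStep, pvFin, pvVisits, ih]
          · simp [potezaStep, h1, h2, h3, h4, pvFin, pvVisits, ih]

-- A's concatenated visit list is the flat stream
theorem vsi_eq (opisi : List (Int × Int × String)) :
    opisi.foldl (fun acc o => acc ++ koraki o.1 o.2.1 o.2.2) [] = pvAll opisi := by
  induction opisi using List.reverseRecOn with
  | nil => simp [pvAll]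
  | append_singleton os o ih =>
    rw [List.foldl_append, ih]
    simp [pvAll, koraki_eq]

-- B's outer loop folds obisci over the flat stream
theorem alt_fold_eq (opisi : List (Int × Int × String)) :
    opisi.foldl
      (fun (db : PySem.Dict (Int × Int) Int × Int) o =>
        (o.2.2.toList.foldl potezaStep (obisci db (o.1, o.2.1), o.1, o.2.1)).1)
      (PySem.Dict.empty, 0) =
    (pvAll opisi).foldl obisci (PySem.Dict.empty, 0) := by
  induction opisi using List.reverseRecOn with
  | nil => simp [pvAll]
  | append_singleton os o ih =>
    rw [List.foldl_append, ih]
    simp only [pvAll, List.flatMap_append, List.foldl_append]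
    simp [potezaFold]

-- the dict component of B's fold is the counting fold
theorem fst_foldl_obisci (L : List (Int × Int)) (d : PySem.Dict (Int × Int) Int) (b : Int) :
    (L.foldl obisci (d, b)).1 = L.foldl (fun d x => d.insert x (d.getD x 0 + 1)) d := by
  induction L generalizing d b with
  | nil => rfl
  | cons p L ih => simp [obisci, ih]


theorem pvMx_nonneg (L : List (Int × Int)) : 0 ≤ pvMx L :=
  (PySem.List.le_foldl_max _ 0).1

theorem foldmax_le (xs ys : List Int) (h : ∀ v ∈ xs, v ∈ ys) :
    xs.foldl max 0 ≤ ys.foldl max 0 := by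
  rcases PySem.List.foldl_max_mem xs 0 with h0 | hm
  · rw [h0]; exact (PySem.List.le_foldl_max ys 0).1
  · exact (PySem.List.le_foldl_max ys 0).2 _ (h _ hm)

theorem foldmax_mem_eq (xs ys : List Int) (h : ∀ v, v ∈ xs ↔ v ∈ ys) :
    xs.foldl max 0 = ys.foldl max 0 :=
  le_antisymm (foldmax_le xs ys fun v hv => (h v).1 hv)
    (foldmax_le ys xs fun v hv => (h v).2 hv)

theorem mx_append (L : List (Int × Int)) (p : Int × Int) :
    pvMx (L ++ [p]) = max (pvMx L) ((L.count p : Int) + 1) := by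
  have hcp : ((L ++ [p]).count p : Int) = (L.count p : Int) + 1 := by
    rw [List.count_append]; simp
  have hmem : ((L.count p : Int) + 1) ∈ (L ++ [p]).map (fun q => ((L ++ [p]).count q : Int)) := by
    rw [← hcp]; exact List.mem_map_of_mem (by simp)
  apply le_antisymm
  · rcases PySem.List.foldl_max_mem ((L ++ [p]).map (fun q => ((L ++ [p]).count q : Int))) 0 with h0 | hm
    · rw [pvMx, h0]; exact le_max_of_le_left (pvMx_nonneg L)
    · obtain ⟨x, hx, hv⟩ := List.mem_map.1 hm
      rw [pvMx, ← hv]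
      by_cases hxp : x = p
      · subst hxp; rw [hcp]; exact le_max_right _ _
      · have hxL : x ∈ L := by
          rcases List.mem_append.1 hx with h | h
          · exact h
          · exact absurd (List.mem_singleton.1 h) hxp
        have hcx : ((L ++ [p]).count x : Int) = (L.count x : Int) := by
          rw [List.count_append]; simp [Ne.symm hxp]
        rw [hcx]
        exact le_max_of_le_left
          ((PySem.List.le_foldl_max _ 0).2 _ (List.mem_map_of_mem hxL))
  · apply max_le
    · rcases PySem.List.foldl_max_mem (L.map (fun q => ((L.count q) : Int))) 0 with h0 | hm
      · rw [pvMx, h0]; exact pvMx_nonneg _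
      · obtain ⟨x, hx, hv⟩ := List.mem_map.1 hm
        rw [pvMx, ← hv]
        have hle : (L.count x : Int) ≤ ((L ++ [p]).count x : Int) := by
          rw [List.count_append]; exact_mod_cast Nat.le_add_right _ _
        exact le_trans hle
          ((PySem.List.le_foldl_max _ 0).2 _
            (List.mem_map_of_mem (List.mem_append_left _ hx)))
    · exact (PySem.List.le_foldl_max _ 0).2 _ hmem

-- the best component of B's fold is the maximum count of the stream
theorem snd_foldl_obisci (L : List (Int × Int)) :
    (L.foldl obisci (PySem.Dict.empty, 0)).2 = pvMx L := by
  induction L using List.reverseRecOn with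
  | nil => rfl
  | append_singleton L p ih =>
    have hd := fst_foldl_obisci L PySem.Dict.empty 0
    rw [PySem.Dict.foldl_insert_getD_add_one_eq_counter] at hd
    rw [List.foldl_append]
    simp only [List.foldl_cons, List.foldl_nil, obisci, hd, PySem.Dict.getD_counter, ih, mx_append]
    omega

-- A's max-scan over the counter's items is the same maximum
theorem st_eq_mx (L : List (Int × Int)) :
    (PySem.Dict.counter L).items.foldl (fun st kv => if st < kv.2 then kv.2 else st) 0 = pvMx L := by
  rw [PySem.Dict.items_counter, List.foldl_map]
  show (PySem.Set.ofList L).foldl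
      (fun st k => if st < ((L.count k) : Int) then ((L.count k) : Int) else st) 0 = pvMx L
  rw [show (fun (st : Int) (k : Int × Int) =>
        if st < ((L.count k) : Int) then ((L.count k) : Int) else st)
      = (fun st k => max st ((L.count k) : Int)) from
    funext fun st => funext fun k => by omega]
  rw [show (PySem.Set.ofList L).foldl (fun st k => max st ((L.count k) : Int)) 0
      = ((PySem.Set.ofList L).map (fun k => ((L.count k) : Int))).foldl max 0 from
    by rw [List.foldl_map]]
  apply foldmax_mem_eq
  intro v
  simp [List.mem_map, PySem.Set.mem_ofList]

-- ===== VERDICT (by name: the statement is the Claim_ definition above) =====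
theorem najveckrat_obiskana_spec : Claim_equal_najveckrat_obiskana := by
  intro opisi _
  show najveckrat_obiskana opisi = najveckrat_obiskana_alt opisi
  simp only [najveckrat_obiskana, najveckrat_obiskana_alt]
  rw [vsi_eq, alt_fold_eq]
  rw [show (pvAll opisi).foldl
      (fun (d : PySem.Dict (Int × Int) Int) ime => d.modify ime 0 (· + 1)) PySem.Dict.empty
      = PySem.Dict.counter (pvAll opisi) from rfl]
  have hfst := fst_foldl_obisci (pvAll opisi) PySem.Dict.empty 0
  rw [PySem.Dict.foldl_insert_getD_add_one_eq_counter] at hfst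
  have hsnd := snd_foldl_obisci (pvAll opisi)
  rw [hfst, hsnd, st_eq_mx]
  rw [show (fun (acc : List (Int × Int)) (kv : (Int × Int) × Int) =>
        if pvMx (pvAll opisi) = kv.2 then acc ++ [kv.1] else acc)
      = (fun acc kv => if (fun (kv : (Int × Int) × Int) => decide (pvMx (pvAll opisi) = kv.2)) kv = true
          then acc ++ [kv.1] else acc) from funext fun acc => funext fun kv => by simp]
  rw [PySem.List.foldl_append_if]
  rw [List.nil_append]
  congr 1
  congr 1
  apply List.filter_congr
  intro kv _
  simp [eq_comm]
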